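-- pv_equiv track=rewrite | github.com/MrBrantCode/unitest_baseline | mut_generate/mist_train_cf/cf_15050/solution.py | create_squares_dictionary
-- ===== SOURCE A (Python) =====
-- def create_squares_dictionary(n):
--     squares_dict = {}
--     square_sum = 0
--     for num in range(1, n+1):
--         square = num**2
--         if square != num:
--             squares_dict[num] = square
--             square_sum += square
--     return squares_dict, square_sum
-- ===== SOURCE B (Python) =====
-- def create_squares_dictionary(n):
--     # 1 is the only num in range(1, n+1) with num**2 == num, so start at 2;
--     # the sum is the closed-form sum of squares minus the excluded 1, clamped for n <= 1.
--     squares_dict = {num: num * num for num in range(2, n + 1)}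
--     square_sum = max(0, n * (n + 1) * (2 * n + 1) // 6 - 1)
--     return squares_dict, square_sum
-- ===== Notes on version B (the rewrite author's own statement) =====
-- stated objective: simpler
-- what changed: The accumulating loop is replaced by a dict comprehension over range(2, n+1) and the running sum by the closed-form n(n+1)(2n+1)//6 - 1 (clamped to 0 for n <= 1).
import Mathlib
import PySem

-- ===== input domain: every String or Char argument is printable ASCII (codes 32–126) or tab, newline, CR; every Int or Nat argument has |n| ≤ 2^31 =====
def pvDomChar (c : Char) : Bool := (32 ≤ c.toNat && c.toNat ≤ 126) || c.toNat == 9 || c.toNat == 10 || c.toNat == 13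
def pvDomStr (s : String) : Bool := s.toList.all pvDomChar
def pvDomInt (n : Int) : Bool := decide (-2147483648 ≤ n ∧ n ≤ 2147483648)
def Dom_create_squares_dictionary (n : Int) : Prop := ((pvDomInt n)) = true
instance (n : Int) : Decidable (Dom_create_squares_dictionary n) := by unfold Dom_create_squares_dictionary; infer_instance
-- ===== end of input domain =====

-- B replaces A's accumulating loop by a comprehension over range(2, n+1) and the closed-form
-- sum-of-squares formula (clamped to 0 for n ≤ 1); objective: simpler.

-- ===== PORT A =====
-- loop body of A: 'square = num**2; if square != num: dict[num] = square; sum += square'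
def pvStepA (st : PySem.Dict Int Int × Int) (num : Int) : PySem.Dict Int Int × Int :=
  let square := num ^ 2
  if square ≠ num then (st.1.insert num square, st.2 + square) else st

def create_squares_dictionary (n : Int) : (List (Int × Int)) × Int :=
  let st := (PySem.List.pyRange 1 (n + 1) 1).foldl pvStepA (PySem.Dict.empty, 0)
  (st.1.items, st.2)

-- ===== PORT B =====
def create_squares_dictionary_alt (n : Int) : (List (Int × Int)) × Int :=
  ((PySem.List.pyRange 2 (n + 1) 1).map (fun num => (num, num * num)),
   max 0 (PySem.Int.floordiv (n * (n + 1) * (2 * n + 1)) 6 - 1))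

-- ===== PRECONDITION & SPEC =====
def Spec_create_squares_dictionary (n : Int) (out : (List (Int × Int)) × Int) : Prop := out = create_squares_dictionary_alt n
instance (n : Int) (out : (List (Int × Int)) × Int) : Decidable (Spec_create_squares_dictionary n out) := by unfold Spec_create_squares_dictionary; infer_instance

-- ===== CLAIM (what is proved, stated in full; the proofs are below) =====
def Claim_equal_create_squares_dictionary : Prop := ∀ (n : Int), Dom_create_squares_dictionary n → Spec_create_squares_dictionary n (create_squares_dictionary n)

-- ===== LEMMAS AND PROOFS =====

-- Invariant of A's loop up to n = m+1: the dict's items are the pairs (k, k*k) for k = 2..n,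
-- and the running sum s satisfies 6*(s+1) = n(n+1)(2n+1) with 0 ≤ s.
lemma pv_loop_char (m : Nat) :
    (((PySem.List.pyRange 1 ((m : Int) + 2) 1).foldl pvStepA (PySem.Dict.empty, 0)).1.items
        = (PySem.List.pyRange 2 ((m : Int) + 2) 1).map (fun k => (k, k * k))) ∧
    (6 * (((PySem.List.pyRange 1 ((m : Int) + 2) 1).foldl pvStepA (PySem.Dict.empty, 0)).2 + 1)
        = ((m : Int) + 1) * ((m : Int) + 2) * (2 * ((m : Int) + 1) + 1)) ∧
    (0 ≤ ((PySem.List.pyRange 1 ((m : Int) + 2) 1).foldl pvStepA (PySem.Dict.empty, 0)).2) := by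
  induction m with
  | zero => refine ⟨?_, ?_, ?_⟩ <;> decide
  | succ m ih =>
    obtain ⟨ih1, ih2, ih3⟩ := ih
    push_cast
    have hrw : PySem.List.pyRange 1 ((m : Int) + 1 + 2) 1
        = PySem.List.pyRange 1 ((m : Int) + 2) 1 ++ [(m : Int) + 2] := by
      have := PySem.List.pyRange_one_succ_right (a := 1) (b := (m : Int) + 2) (by omega)
      rw [show (m : Int) + 1 + 2 = (m : Int) + 2 + 1 by ring, this]
    have hrw2 : PySem.List.pyRange 2 ((m : Int) + 1 + 2) 1
        = PySem.List.pyRange 2 ((m : Int) + 2) 1 ++ [(m : Int) + 2] := by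
      have := PySem.List.pyRange_one_succ_right (a := 2) (b := (m : Int) + 2) (by omega)
      rw [show (m : Int) + 1 + 2 = (m : Int) + 2 + 1 by ring, this]
    set st := (PySem.List.pyRange 1 ((m : Int) + 2) 1).foldl pvStepA (PySem.Dict.empty, 0) with hst
    have hne : ((m : Int) + 2) ^ 2 ≠ (m : Int) + 2 := by nlinarith [sq_nonneg ((m : Int) + 1)]
    have hstep : (PySem.List.pyRange 1 ((m : Int) + 1 + 2) 1).foldl pvStepA (PySem.Dict.empty, 0)
        = (st.1.insert ((m : Int) + 2) (((m : Int) + 2) ^ 2), st.2 + ((m : Int) + 2) ^ 2) := by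
      rw [hrw, List.foldl_append, ← hst]
      show pvStepA st _ = _
      simp [pvStepA, hne]
    have hnc : st.1.contains ((m : Int) + 2) = false := by
      have hk : ((m : Int) + 2) ∉ st.1.keys := by
        simp only [PySem.Dict.keys, ih1, List.map_map]
        intro hmem
        obtain ⟨x, hx, hfx⟩ := List.mem_map.mp hmem
        have := (PySem.List.mem_pyRange_one).mp hx
        simp at hfx
        omega
      rcases h : st.1.contains ((m : Int) + 2) with _ | _
      · rfl
      · exact absurd ((PySem.Dict.contains_iff_mem_keys _ _).mp h) hk
    refine ⟨?_, ?_, ?_⟩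
    · rw [hstep]
      simp only [hrw2, List.map_append, List.map_cons, List.map_nil]
      rw [PySem.Dict.items_insert_of_not_contains _ _ hnc, ih1]
      congr 1
      simp [sq]
    · rw [hstep]
      push_cast
      linear_combination ih2
    · rw [hstep]
      have := sq_nonneg ((m : Int) + 2)
      linarith

-- ===== VERDICT (by name: the statement is the Claim_ definition above) =====
theorem create_squares_dictionary_spec : Claim_equal_create_squares_dictionary := by
  intro n _
  unfold Spec_create_squares_dictionary create_squares_dictionary create_squares_dictionary_alt
  by_cases hn : n ≤ 0
  · have hA : PySem.List.pyRange 1 (n + 1) 1 = [] := PySem.List.pyRange_one_eq_nil (by omega)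
    have hB : PySem.List.pyRange 2 (n + 1) 1 = [] := PySem.List.pyRange_one_eq_nil (by omega)
    have hP : n * (n + 1) * (2 * n + 1) < 12 := by nlinarith [sq_nonneg n, sq_nonneg (n + 1), sq_nonneg (2 * n + 1)]
    have hfd : PySem.Int.floordiv (n * (n + 1) * (2 * n + 1)) 6 < 2 :=
      (PySem.Int.floordiv_lt_iff_lt_mul (by omega)).mpr (by omega)
    simp only [hA, hB, List.foldl_nil, List.map_nil]
    refine Prod.ext (by simp [PySem.Dict.empty]) ?_
    simp only
    omega
  · push Not at hn
    obtain ⟨m, hm⟩ : ∃ m : Nat, n = (m : Int) + 1 := ⟨(n - 1).toNat, by omega⟩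
    subst hm
    obtain ⟨h1, h2, h3⟩ := pv_loop_char m
    have hr : (m : Int) + 1 + 1 = (m : Int) + 2 := by ring
    rw [hr]
    set st := (PySem.List.pyRange 1 ((m : Int) + 2) 1).foldl pvStepA (PySem.Dict.empty, 0)
    refine Prod.ext (by simpa using h1) ?_
    have hfd : PySem.Int.floordiv (((m : Int) + 1) * ((m : Int) + 2) * (2 * ((m : Int) + 1) + 1)) 6 = st.2 + 1 := by
      rw [← h2]
      exact (PySem.Int.floordiv_eq_iff_of_pos (by omega)).mpr (by constructor <;> omega)
    simp only [hfd]
    omega
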